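-- pv_equiv track=rewrite | github.com/Mejri10/codewars-solutions | 6-kyu/grouped-by-commas/python/solution.py | group_by_commas
-- ===== SOURCE A (Python) =====
-- def group_by_commas(n):
--     s = ''
--     for i, d in enumerate(str(n)[::-1]):
--         if i % 3 == 0 and i != 0:
--             s += ',' + d
--         else:
--             s += d
--     return s[::-1]
-- ===== SOURCE B (Python) =====
-- def group_by_commas(n):
--     s = str(n)
--     chunks = []
--     while len(s) > 3:
--         chunks.append(s[-3:])
--         s = s[:-3]
--     chunks.append(s)
--     return ','.join(reversed(chunks))
-- ===== Notes on version B (the rewrite author's own statement) =====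
-- stated objective: simpler
-- what changed: Replaces the per-character enumerate fold with commas inserted by index arithmetic and a final reversal by peeling three-character chunks off the end of the string with slicing and joining them with ','.
import Mathlib
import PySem

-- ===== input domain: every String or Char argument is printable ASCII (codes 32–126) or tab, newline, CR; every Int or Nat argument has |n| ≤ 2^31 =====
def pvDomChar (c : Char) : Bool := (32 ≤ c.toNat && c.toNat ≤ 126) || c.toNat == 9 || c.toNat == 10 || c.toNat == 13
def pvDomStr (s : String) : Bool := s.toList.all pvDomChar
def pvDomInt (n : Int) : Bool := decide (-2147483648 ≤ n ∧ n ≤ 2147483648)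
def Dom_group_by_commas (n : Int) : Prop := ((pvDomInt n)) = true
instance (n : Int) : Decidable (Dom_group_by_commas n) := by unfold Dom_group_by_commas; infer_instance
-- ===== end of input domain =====

-- B re-implements A by peeling 3-character chunks off the right of str(n) with slicing
-- and joining them with ',' (no special-casing of the minus sign, exactly as A counts it
-- like a digit), instead of A's per-character fold over enumerate(str(n)[::-1]).

-- ===== PORT A =====
-- str(n)[::-1] is the reverse of the code-point list (PySem.Str.slice?_none_none_neg_one);
-- the string concatenations 's += …' are performed on the code-point list and packed at the end.
-- enumerate indices are ≥ 0, where Lean's Int % agrees with Python's % for modulus 3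
def pvStepA (s : List Char) (p : Int × Char) : List Char :=
  if p.1 % 3 == 0 && p.1 != 0 then s ++ [','] ++ [p.2] else s ++ [p.2]

def group_by_commas (n : Int) : String :=
  String.ofList
    (((PySem.List.enumerate ((PySem.Int.toChars n).reverse) 0).foldl pvStepA []).reverse)

-- ===== PORT B =====
-- the while loop of Source B: chunks.append(s[-3:]); s = s[:-3]  (the slices are exact here:
-- len s > 3, so s[-3:] = drop (len-3) and s[:-3] = take (len-3))
def pvPeel (s : List Char) (chunks : List (List Char)) : List (List Char) :=
  if 3 < s.length then
    pvPeel (s.take (s.length - 3)) (chunks ++ [s.drop (s.length - 3)])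
  else chunks ++ [s]
termination_by s.length
decreasing_by simp; omega

def group_by_commas_alt (n : Int) : String :=
  String.ofList (PySem.Chars.join [','] (pvPeel (PySem.Int.toChars n) []).reverse)

-- ===== PRECONDITION & SPEC =====
def Spec_group_by_commas (n : Int) (out : String) : Prop := out = group_by_commas_alt n
instance (n : Int) (out : String) : Decidable (Spec_group_by_commas n out) := by unfold Spec_group_by_commas; infer_instance

-- ===== CLAIM (what is proved, stated in full; the proofs are below) =====
def Claim_equal_group_by_commas : Prop := ∀ (n : Int), Dom_group_by_commas n → Spec_group_by_commas n (group_by_commas n)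

-- ===== LEMMAS AND PROOFS =====

-- What A's fold produces past the first 3 characters of the reversed string:
-- a comma before every further 3-chunk.
def pvH (r : List Char) : List Char :=
  if r = [] then [] else ',' :: (r.take 3 ++ pvH (r.drop 3))
termination_by r.length
decreasing_by
  simp only [List.length_drop]
  have := List.length_pos_of_ne_nil (by assumption : r ≠ [])
  omega

lemma pvH_nil : pvH [] = [] := by rw [pvH]; simp

lemma pvH_ne (r : List Char) (h : r ≠ []) :
    pvH r = ',' :: (r.take 3 ++ pvH (r.drop 3)) := by rw [pvH]; simp [h]

-- the two cores, on an arbitrary code-point list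
def pvA (l : List Char) : List Char :=
  ((PySem.List.enumerate l.reverse 0).foldl pvStepA []).reverse

def pvB (l : List Char) : List Char :=
  PySem.Chars.join [','] (pvPeel l []).reverse

lemma pvChunk0 (t : List Char) (ht : t.length ≤ 3) (acc : List Char) :
    (PySem.List.enumerate t 0).foldl pvStepA acc = acc ++ t := by
  rcases t with _ | ⟨a, _ | ⟨b, _ | ⟨c, rest⟩⟩⟩
  · simp [PySem.List.enumerate_nil]
  · simp [PySem.List.enumerate_cons, PySem.List.enumerate_nil, pvStepA]
  · simp [PySem.List.enumerate_cons, PySem.List.enumerate_nil, pvStepA]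
  · have : rest = [] := by
      simp at ht
      exact List.length_eq_zero_iff.mp (by omega)
    subst this
    simp [PySem.List.enumerate_cons, PySem.List.enumerate_nil, pvStepA]

lemma pvChunk3 (i0 : Int) (h0 : 0 < i0) (h3 : i0 % 3 = 0)
    (t : List Char) (ht : t.length ≤ 3) (htn : t ≠ []) (acc : List Char) :
    (PySem.List.enumerate t i0).foldl pvStepA acc = acc ++ ',' :: t := by
  have hne : i0 ≠ 0 := by omega
  have e0 : (i0 % 3 == 0 && i0 != 0) = true := by simp [h3, hne]
  have h1 : (i0 + 1) % 3 = 1 := by omega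
  have e1 : ((i0 + 1) % 3 == 0 && (i0 + 1) != 0) = false := by simp [h1]
  have h2 : (i0 + 1 + 1) % 3 = 2 := by omega
  have e2 : ((i0 + 1 + 1) % 3 == 0 && (i0 + 1 + 1) != 0) = false := by simp [h2]
  rcases t with _ | ⟨a, _ | ⟨b, _ | ⟨c, rest⟩⟩⟩
  · simp at htn
  · simp [PySem.List.enumerate_cons, PySem.List.enumerate_nil, pvStepA, e0]
  · simp [PySem.List.enumerate_cons, PySem.List.enumerate_nil, pvStepA, e0, e1]
  · have : rest = [] := by
      simp at ht
      exact List.length_eq_zero_iff.mp (by omega)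
    subst this
    simp [PySem.List.enumerate_cons, PySem.List.enumerate_nil, pvStepA, e0, e1, e2]

lemma pvH_fold (k : Nat) : ∀ (r : List Char), r.length ≤ k → ∀ (acc : List Char) (i0 : Int),
    0 < i0 → i0 % 3 = 0 →
    (PySem.List.enumerate r i0).foldl pvStepA acc = acc ++ pvH r := by
  induction k with
  | zero =>
    intro r hr acc i0 h0 h3
    have : r = [] := List.length_eq_zero_iff.mp (by omega)
    subst this
    simp [PySem.List.enumerate_nil, pvH_nil]
  | succ k ih =>
    intro r hr acc i0 h0 h3
    rcases eq_or_ne r [] with rfl | hne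
    · simp [PySem.List.enumerate_nil, pvH_nil]
    · rw [pvH_ne r hne]
      conv_lhs => rw [(List.take_append_drop 3 r).symm]
      rw [PySem.List.enumerate_append, List.foldl_append]
      have hlen : (r.take 3).length ≤ 3 := by simp
      have hpos : 0 < r.length := List.length_pos_of_ne_nil hne
      have htn : r.take 3 ≠ [] := by
        simp [List.take_eq_nil_iff]; omega
      rw [pvChunk3 i0 h0 h3 _ hlen htn acc]
      rcases eq_or_ne (r.drop 3) [] with hd | hd
      · rw [hd]
        simp [PySem.List.enumerate_nil, pvH_nil]
      · have h3len : (r.take 3).length = 3 := by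
          have : ¬ r.length ≤ 3 := by
            intro h; exact hd (List.drop_eq_nil_iff.mpr (by omega))
          simp; omega
        rw [h3len]
        rw [ih (r.drop 3) (by simp; omega) (acc ++ ',' :: r.take 3)
          (i0 + (3 : Nat)) (by push_cast; omega) (by push_cast; omega)]
        simp

lemma pvA_char (l : List Char) :
    pvA l = ((l.reverse.take 3) ++ pvH (l.reverse.drop 3)).reverse := by
  unfold pvA
  congr 1
  conv_lhs => rw [(List.take_append_drop 3 l.reverse).symm]
  rw [PySem.List.enumerate_append, List.foldl_append]
  rw [pvChunk0 _ (by simp) []]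
  rcases eq_or_ne (l.reverse.drop 3) [] with hd | hd
  · rw [hd]; simp [PySem.List.enumerate_nil, pvH_nil]
  · have hlen : ¬ l.reverse.length ≤ 3 := by
      intro h; exact hd (List.drop_eq_nil_iff.mpr (by omega))
    have h3len : (l.reverse.take 3).length = 3 := by
      simp only [List.length_take]; omega
    rw [h3len]
    exact pvH_fold (l.reverse.drop 3).length _ le_rfl _ _ (by norm_num) (by norm_num)

lemma pvA_base (l : List Char) (h : l.length ≤ 3) : pvA l = l := by
  rw [pvA_char]
  have hd : l.reverse.drop 3 = [] := List.drop_eq_nil_iff.mpr (by simpa using h)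
  rw [hd, pvH_nil, List.append_nil,
      List.take_of_length_le (by simpa using h), List.reverse_reverse]

lemma pvA_step (m t : List Char) (hm : m ≠ []) (ht : t.length = 3) :
    pvA (m ++ t) = pvA m ++ ',' :: t := by
  have htr : t.reverse.length = 3 := by simpa using ht
  have key : (m ++ t).reverse = t.reverse ++ m.reverse := by simp
  rw [pvA_char, pvA_char, key]
  rw [show (3 : Nat) = t.reverse.length from htr.symm, List.take_left, List.drop_left]
  rw [pvH_ne m.reverse (by simpa using hm)]
  simp [ht]

lemma pvPeel_acc (k : Nat) : ∀ (s : List Char), s.length ≤ k → ∀ (chunks : List (List Char)),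
    pvPeel s chunks = chunks ++ pvPeel s [] := by
  induction k with
  | zero =>
    intro s hs chunks
    have : ¬ 3 < s.length := by omega
    conv_lhs => rw [pvPeel]
    conv_rhs => rw [pvPeel]
    simp [this]
  | succ k ih =>
    intro s hs chunks
    by_cases h : 3 < s.length
    · conv_lhs => rw [pvPeel]
      conv_rhs => rw [pvPeel]
      simp only [h, if_true]
      rw [ih _ (by simp; omega) (chunks ++ [s.drop (s.length - 3)]),
          ih _ (by simp; omega) ([] ++ [s.drop (s.length - 3)])]
      simp
    · conv_lhs => rw [pvPeel]
      conv_rhs => rw [pvPeel]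
      simp [h]

lemma pvPeel_ne_nil (s : List Char) (chunks : List (List Char)) : pvPeel s chunks ≠ [] := by
  rw [pvPeel]
  split
  · exact pvPeel_ne_nil _ _
  · simp
termination_by s.length
decreasing_by simp; omega

lemma pvJoin_append_single (sep t : List Char) (parts : List (List Char)) (h : parts ≠ []) :
    PySem.Chars.join sep (parts ++ [t]) = PySem.Chars.join sep parts ++ sep ++ t := by
  induction parts with
  | nil => simp at h
  | cons x xs ih =>
    rcases xs with _ | ⟨y, ys⟩
    · simp [PySem.Chars.join_cons_cons, PySem.Chars.join_singleton]
    · simp only [List.cons_append]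
      simp only [List.cons_append] at ih
      rw [PySem.Chars.join_cons_cons, ih (by simp), PySem.Chars.join_cons_cons]
      simp

lemma pvB_base (l : List Char) (h : l.length ≤ 3) : pvB l = l := by
  unfold pvB
  rw [pvPeel]
  simp only [show ¬ 3 < l.length by omega, if_false, List.nil_append]
  simp [PySem.Chars.join_singleton]

lemma pvB_step (l : List Char) (h : 3 < l.length) :
    pvB l = pvB (l.take (l.length - 3)) ++ ',' :: l.drop (l.length - 3) := by
  unfold pvB
  conv_lhs => rw [pvPeel]
  simp only [h, if_true]
  rw [pvPeel_acc (l.take (l.length - 3)).length _ le_rfl ([] ++ [l.drop (l.length - 3)])]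
  rw [List.nil_append, List.singleton_append, List.reverse_cons]
  rw [pvJoin_append_single _ _ _ (by simp [pvPeel_ne_nil])]
  simp

lemma pvAB (k : Nat) : ∀ (l : List Char), l.length ≤ k → pvA l = pvB l := by
  induction k with
  | zero =>
    intro l hl
    rw [pvA_base l (by omega), pvB_base l (by omega)]
  | succ k ih =>
    intro l hl
    by_cases h : 3 < l.length
    · have hsp : l = l.take (l.length - 3) ++ l.drop (l.length - 3) :=
        (List.take_append_drop _ l).symm
      have hm : l.take (l.length - 3) ≠ [] := by
        intro hnil
        have := congrArg List.length hnil
        rw [List.length_take_of_le (by omega)] at this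
        simp at this
        omega
      have ht : (l.drop (l.length - 3)).length = 3 := by simp; omega
      rw [pvB_step l h]
      conv_lhs => rw [hsp]
      rw [pvA_step _ _ hm ht,
          ih (l.take (l.length - 3)) (by rw [List.length_take_of_le (by omega)]; omega)]
    · rw [pvA_base l (by omega), pvB_base l (by omega)]

-- ===== VERDICT (by name: the statement is the Claim_ definition above) =====
theorem group_by_commas_spec : Claim_equal_group_by_commas := by
  intro n _
  unfold Spec_group_by_commas group_by_commas group_by_commas_alt
  exact congrArg String.ofList (pvAB (PySem.Int.toChars n).length _ le_rfl)
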